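-- pv_equiv track=rewrite | github.com/yestinchen/ranked_window_retrieval | rankedvq/io.py | filter_frames_with_types
-- ===== SOURCE A (Python) =====
-- def filter_frames_with_types(frames, obj_types):
--   results = []
--   for frame in frames:
--     _dict = dict()
--     for type in obj_types:
--       if type in frame:
--         _dict[type] = frame[type]
--     results.append(_dict)
--   return results
-- ===== SOURCE B (Python) =====
-- def filter_frames_with_types(frames, obj_types):
--   # Inverted index + sort: map each type to its first-occurrence position once,
--   # then per frame collect the matching keys from the frame itself and sort them
--   # back into obj_types order before emitting the dict.
--   pos = {}
--   for i, t in enumerate(obj_types):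
--     if t not in pos:
--       pos[t] = i
--   out = []
--   for frame in frames:
--     hits = sorted((k for k in frame if k in pos), key=lambda k: pos[k])
--     out.append({k: frame[k] for k in hits})
--   return out
-- ===== Notes on version B (the rewrite author's own statement) =====
-- stated objective: faster
-- what changed: B replaces A's per-frame scan of obj_types with an inverted index: it builds a first-occurrence position map over obj_types once, then for each frame collects the matching keys from the frame itself and sorts them by that position to restore obj_types order, emitting identical dicts.
import Mathlib
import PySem

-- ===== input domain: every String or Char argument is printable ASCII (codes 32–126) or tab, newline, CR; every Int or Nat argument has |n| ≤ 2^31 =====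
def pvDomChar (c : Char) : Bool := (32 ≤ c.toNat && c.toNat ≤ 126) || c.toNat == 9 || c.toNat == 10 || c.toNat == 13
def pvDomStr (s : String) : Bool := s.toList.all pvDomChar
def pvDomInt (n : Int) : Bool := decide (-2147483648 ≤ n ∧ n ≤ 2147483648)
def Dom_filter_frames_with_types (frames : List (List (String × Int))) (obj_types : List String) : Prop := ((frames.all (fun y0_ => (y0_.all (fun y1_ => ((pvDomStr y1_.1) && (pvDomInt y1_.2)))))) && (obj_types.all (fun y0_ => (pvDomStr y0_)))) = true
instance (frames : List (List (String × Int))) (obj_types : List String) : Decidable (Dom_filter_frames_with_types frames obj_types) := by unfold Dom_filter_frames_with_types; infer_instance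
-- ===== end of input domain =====

-- B builds a first-occurrence position index over obj_types once, gathers each frame's
-- matching keys from the frame itself and sorts them by that index; same output, an
-- alternative (inverted-index + sort) algorithm.


-- ===== PORT A =====
-- 'if type in frame: _dict[type] = frame[type]' is ported as one first-match lookup
-- (contains + [] fused into get?, exact since the guard makes [] total here).
def filter_frames_with_types (frames : List (List (String × Int))) (obj_types : List String) : List (List (String × Int)) :=
  (frames.foldl (fun results frame =>
    results ++ [(obj_types.foldl (fun d t =>
      match (PySem.Dict.mk frame).get? t with
      | some v => d.insert t v
      | none => d) (PySem.Dict.empty : PySem.Dict String Int)).items]) [])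

-- ===== PORT B =====
-- 'frame[k]' in the comprehension is ported as getD (total here: every k in hits is a key of frame).
def filter_frames_with_types_alt (frames : List (List (String × Int))) (obj_types : List String) : List (List (String × Int)) :=
  let pos : PySem.Dict String Int :=
    (PySem.List.enumerate obj_types 0).foldl (fun d p =>
      if d.contains p.2 then d else d.insert p.2 p.1) PySem.Dict.empty
  (frames.foldl (fun out frame =>
    let D := PySem.Dict.mk frame
    let hits := PySem.List.sorted ((PySem.List.dedup D.keys).filter (fun k => pos.contains k))
      (fun k => pos.getD k 0) false
    out ++ [(hits.foldl (fun d k => d.insert k (D.getD k 0))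
      (PySem.Dict.empty : PySem.Dict String Int)).items]) [])

-- ===== PRECONDITION & SPEC =====
def Spec_filter_frames_with_types (frames : List (List (String × Int))) (obj_types : List String) (out : List (List (String × Int))) : Prop := out = filter_frames_with_types_alt frames obj_types
instance (frames : List (List (String × Int))) (obj_types : List String) (out : List (List (String × Int))) : Decidable (Spec_filter_frames_with_types frames obj_types out) := by unfold Spec_filter_frames_with_types; infer_instance

-- ===== CLAIM (what is proved, stated in full; the proofs are below) =====
def Claim_equal_filter_frames_with_types : Prop := ∀ (frames : List (List (String × Int))) (obj_types : List String), Dom_filter_frames_with_types frames obj_types → Spec_filter_frames_with_types frames obj_types (filter_frames_with_types frames obj_types)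

-- ===== LEMMAS AND PROOFS =====

-- the canonical per-frame key list both sides will be reduced to
def fftKeys (frame : List (String × Int)) (obj_types : List String) : List String :=
  (PySem.List.dedup obj_types).filter (fun t => (PySem.Dict.mk frame).contains t)

-- PySem.List.dedup over an appended element
theorem fft_dedup_append (ts : List String) (t : String) :
    PySem.List.dedup (ts ++ [t]) = if t ∈ ts then PySem.List.dedup ts else PySem.List.dedup ts ++ [t] := by
  simp only [PySem.List.dedup_eq_ofList, PySem.Set.ofList_eq_foldl, List.foldl_append, List.foldl]
  rw [← PySem.Set.ofList_eq_foldl, PySem.Set.add_eq_ite]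
  simp [PySem.Set.mem_ofList]

-- A's per-frame fold of conditional inserts (value a function of the key) in items form
theorem fft_items_foldl (D : PySem.Dict String Int) (ts : List String) :
    (ts.foldl (fun d t =>
        match D.get? t with
        | some v => d.insert t v
        | none => d) (PySem.Dict.empty : PySem.Dict String Int)).items
      = ((PySem.List.dedup ts).filter (fun t => D.contains t)).map (fun t => (t, D.getD t 0)) := by
  induction ts using List.reverseRecOn with
  | nil => rfl
  | append_singleton ts t ih =>
    rw [List.foldl_append, List.foldl, List.foldl, fft_dedup_append]
    set d' := ts.foldl (fun d t =>
        match D.get? t with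
        | some v => d.insert t v
        | none => d) (PySem.Dict.empty : PySem.Dict String Int) with hd'
    have hcontains : ∀ x, d'.contains x = decide (x ∈ ts ∧ D.contains x) := by
      intro x
      have hk : d'.keys = d'.items.map (·.1) := rfl
      have : d'.keys = ((PySem.List.dedup ts).filter (fun t => D.contains t)) := by
        rw [hk, ih, List.map_map]; simp [Function.comp_def]
      rw [PySem.Dict.contains_eq_decide_mem_keys, this]
      simp [List.mem_filter, PySem.List.mem_dedup, and_comm]
    cases hD : D.get? t with
    | none =>
      have hDc : D.contains t = false := by
        rw [PySem.Dict.contains_eq_isSome_get?, hD]; rfl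
      split_ifs with hmem <;> simp [ih, hDc]
    | some v =>
      have hDc : D.contains t = true := by
        rw [PySem.Dict.contains_eq_isSome_get?, hD]; rfl
      have hv : D.getD t 0 = v := PySem.Dict.getD_of_get?_eq_some D 0 hD
      by_cases hmem : t ∈ ts
      · -- overwrite in place: every item with key t is already (t, v)
        have hc : d'.contains t = true := by
          rw [hcontains]; simp [hmem, hDc]
        rw [if_pos hmem, PySem.Dict.items_insert_of_contains _ _ hc, ih]
        rw [List.map_map]
        apply List.map_congr_left
        intro x hx
        have hxd : D.contains x := by
          simp only [List.mem_filter] at hx; exact hx.2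
        by_cases hxt : x = t
        · subst hxt; simp [Function.comp, hv]
        · simp [Function.comp, hxt]
      · have hc : d'.contains t = false := by
          rw [hcontains]; simp [hmem]
        rw [if_neg hmem, PySem.Dict.items_insert_of_not_contains _ _ hc, ih]
        simp [hDc, hv]

-- pos's lookup: first-occurrence index of t in ts, offset by s, unless already bound
theorem fft_pos_get? (ts : List String) (s : Int) (d : PySem.Dict String Int) (t : String) :
    ((PySem.List.enumerate ts s).foldl (fun d p =>
        if d.contains p.2 then d else d.insert p.2 p.1) d).get? t
      = match d.get? t with
        | some v => some v
        | none => (PySem.List.index? ts t).map (fun n : Nat => s + n) := by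
  induction ts generalizing s d with
  | nil =>
    simp only [PySem.List.enumerate_nil, List.foldl]
    cases d.get? t <;> simp [PySem.List.index?_eq_idxOf?]
  | cons x xs ih =>
    rw [PySem.List.enumerate_cons, List.foldl, ih]
    by_cases hxt : x = t
    · subst hxt
      cases hd : d.get? x with
      | some v =>
        have : d.contains x = true := by rw [PySem.Dict.contains_eq_isSome_get?, hd]; rfl
        simp [this, hd]
      | none =>
        have : d.contains x = false := by rw [PySem.Dict.contains_eq_isSome_get?, hd]; rfl
        rw [PySem.List.index?_cons_self]
        simp [this, PySem.Dict.get?_insert_self]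
    · have hgt : (if d.contains x = true then d else d.insert x s).get? t = d.get? t := by
        split_ifs
        · rfl
        · exact PySem.Dict.get?_insert_of_ne _ _ (fun h => hxt h.symm)
      rw [hgt, PySem.List.index?_cons_of_ne _ hxt]
      cases hd : d.get? t with
      | some v => simp
      | none =>
        cases hi : PySem.List.index? xs t with
        | none => simp
        | some n => simp; omega

-- first occurrences are strictly ordered by first-occurrence index
theorem fft_dedup_pairwise (xs : List String) :
    (PySem.List.dedup xs).Pairwise (fun a b => ∀ i j,
      PySem.List.index? xs a = some i → PySem.List.index? xs b = some j → i < j) := by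
  induction xs using List.reverseRecOn with
  | nil => simp [PySem.List.dedup_eq_ofList]
  | append_singleton xs t ih =>
    have hconv : ∀ {a : String}, a ∈ xs →
        ∀ {i : Nat}, PySem.List.index? (xs ++ [t]) a = some i → PySem.List.index? xs a = some i := by
      intro a ha i hi; rwa [PySem.List.index?_append_of_mem _ ha] at hi
    rw [fft_dedup_append]
    split_ifs with hmem
    · exact ih.imp_of_mem (fun ha hb h i j hi hj =>
        h i j (hconv ((PySem.List.mem_dedup _ _).mp ha) hi)
              (hconv ((PySem.List.mem_dedup _ _).mp hb) hj))
    · rw [List.pairwise_append]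
      refine ⟨ih.imp_of_mem (fun ha hb h i j hi hj =>
        h i j (hconv ((PySem.List.mem_dedup _ _).mp ha) hi)
              (hconv ((PySem.List.mem_dedup _ _).mp hb) hj)), by simp, ?_⟩
      intro a ha b hb i j hi hj
      simp only [List.mem_singleton] at hb; subst hb
      have ha' : a ∈ xs := (PySem.List.mem_dedup _ _).mp ha
      have hi' := hconv ha' hi
      obtain ⟨hk, -, -⟩ := PySem.List.getElem_of_index?_eq_some hi'
      rw [PySem.List.index?_append_singleton_self _ _ hmem] at hj
      have hjj := Option.some.inj hj
      omega

-- the sorted hit list of a frame IS obj_types deduped and filtered to the frame's keys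
theorem fft_hits (xs : List String) (D : PySem.Dict String Int) (pos : PySem.Dict String Int)
    (hpos : ∀ t, pos.get? t = (PySem.List.index? xs t).map (fun n : Nat => (n : Int))) :
    PySem.List.sorted ((PySem.List.dedup D.keys).filter (fun k => pos.contains k))
      (fun k => pos.getD k 0) false
      = (PySem.List.dedup xs).filter (fun t => D.contains t) := by
  have hposc : ∀ t, pos.contains t = decide (t ∈ xs) := by
    intro t
    rw [PySem.Dict.contains_eq_isSome_get?, hpos]
    by_cases h : t ∈ xs
    · obtain ⟨i, hi⟩ := Option.isSome_iff_exists.mp ((PySem.List.index?_isSome_iff _ _).mpr h)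
      rw [hi]; simp [h]
    · rw [(PySem.List.index?_eq_none_iff _ _).mpr h]; simp [h]
  have hgetD : ∀ t ∈ xs, ∀ i, PySem.List.index? xs t = some i → pos.getD t 0 = (i : Int) := by
    intro t _ i hi
    rw [PySem.Dict.getD_eq_get?_getD, hpos, hi]; rfl
  apply PySem.List.sorted_eq_of_perm_of_pairwise_lt
  · rw [List.perm_ext_iff_of_nodup
      (((PySem.List.nodup_dedup xs)).filter _) (((PySem.List.nodup_dedup D.keys)).filter _)]
    intro a
    simp only [List.mem_filter, PySem.List.mem_dedup, hposc,
      ← PySem.Dict.contains_iff_mem_keys, decide_eq_true_eq]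
    tauto
  · have := (fft_dedup_pairwise xs).filter (fun t => D.contains t)
    refine this.imp_of_mem (fun {a b} ha hb h => ?_)
    have ha' : a ∈ xs := (PySem.List.mem_dedup _ _).mp (List.mem_of_mem_filter ha)
    have hb' : b ∈ xs := (PySem.List.mem_dedup _ _).mp (List.mem_of_mem_filter hb)
    obtain ⟨i, hi⟩ := Option.isSome_iff_exists.mp ((PySem.List.index?_isSome_iff _ _).mpr ha')
    obtain ⟨j, hj⟩ := Option.isSome_iff_exists.mp ((PySem.List.index?_isSome_iff _ _).mpr hb')
    rw [hgetD a ha' i hi, hgetD b hb' j hj]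
    exact_mod_cast h i j hi hj

-- ===== VERDICT (by name: the statement is the Claim_ definition above) =====
theorem filter_frames_with_types_spec : Claim_equal_filter_frames_with_types := by
  intro frames obj_types _
  show filter_frames_with_types frames obj_types = filter_frames_with_types_alt frames obj_types
  unfold filter_frames_with_types filter_frames_with_types_alt
  rw [PySem.List.foldl_append_singleton_eq_map, PySem.List.foldl_append_singleton_eq_map]
  refine congrArg _ (List.map_congr_left (fun frame _ => ?_))
  set D := PySem.Dict.mk frame with hD
  set pos := (PySem.List.enumerate obj_types 0).foldl (fun d p =>
      if d.contains p.2 then d else d.insert p.2 p.1) (PySem.Dict.empty : PySem.Dict String Int) with hpos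
  have hposget : ∀ t, pos.get? t = (PySem.List.index? obj_types t).map (fun n : Nat => (n : Int)) := by
    intro t
    rw [hpos, fft_pos_get?]
    simp [PySem.Dict.get?_empty]
  rw [fft_items_foldl D obj_types, fft_hits obj_types D pos hposget]
  have hK : ((PySem.List.dedup obj_types).filter (fun t => D.contains t)).Nodup :=
    (PySem.List.nodup_dedup obj_types).filter _
  rw [PySem.Dict.items_foldl_insert_fresh _ (fun a => a) (fun a => D.getD a 0) _
      (fun a _ => PySem.Dict.contains_empty a) (by simpa using hK)]
  rfl
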